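-- pv_equiv track=rewrite | github.com/yani-rivera/UrbanGrowthSDG11 | real_estate_parser/modules/preprocess_listing.py | preprocess_listings
-- ===== SOURCE A (Python) =====
-- def preprocess_listings(lines: list[str], marker: str = "-") -> list[str]:
--     """
--     Merge multiline listings into a single row based on a start marker.
--
--     Args:
--         lines (list[str]): Raw lines from the input text.
--         marker (str): The symbol/string that marks the beginning of a new listing (e.g., "-").
--
--     Returns:
--         list[str]: List of full listings, each as a single space-joined string.
--     """
--     merged = []
--     current_listing = []
--
--     for line in lines:
--         clean_line = line.strip()
--         if not clean_line:
--             continue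
--
--         if clean_line.startswith(marker) and current_listing:
--             merged.append(" ".join(current_listing).strip())
--             current_listing = [clean_line]
--         else:
--             current_listing.append(clean_line)
--
--     if current_listing:
--         merged.append(" ".join(current_listing).strip())
--
--     return merged
-- ===== SOURCE B (Python) =====
-- def preprocess_listings(lines: list[str], marker: str = "-") -> list[str]:
--     """Boundary-table re-implementation: clean once, find group start indices, slice and join."""
--     cleaned = [s for s in (l.strip() for l in lines) if s]
--     starts = [i for i, s in enumerate(cleaned) if i == 0 or s.startswith(marker)]
--     ends = starts[1:] + [len(cleaned)]
--     return [" ".join(cleaned[a:b]).strip() for a, b in zip(starts, ends)]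
-- ===== Notes on version B (the rewrite author's own statement) =====
-- stated objective: alternative
-- what changed: Replaces A's flush-on-boundary accumulator loop with a three-stage pipeline: clean the lines once, build a table of group start indices, then slice the cleaned list between consecutive boundaries and join each slice.
import Mathlib
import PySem

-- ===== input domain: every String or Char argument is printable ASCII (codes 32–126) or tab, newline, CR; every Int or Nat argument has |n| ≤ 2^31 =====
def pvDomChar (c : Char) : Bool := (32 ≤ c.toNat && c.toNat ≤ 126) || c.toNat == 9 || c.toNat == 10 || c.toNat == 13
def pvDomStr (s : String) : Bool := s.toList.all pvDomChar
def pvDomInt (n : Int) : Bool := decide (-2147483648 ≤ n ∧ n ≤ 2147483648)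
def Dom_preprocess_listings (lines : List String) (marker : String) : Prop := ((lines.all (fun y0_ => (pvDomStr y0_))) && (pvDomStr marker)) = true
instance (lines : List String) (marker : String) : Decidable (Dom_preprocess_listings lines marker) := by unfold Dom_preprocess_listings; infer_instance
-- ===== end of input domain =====

-- B replaces A's flush-on-boundary accumulator by a boundary-index table plus a slicing pass (objective: alternative decomposition; return value only, neither mutates).

-- ===== PORT A =====
def preprocess_listings (lines : List String) (marker : String) : List String :=
  let st := lines.foldl (fun (st : List String × List String) line =>
      let clean := PySem.Str.strip line
      if clean = "" then st
      else if PySem.Str.startswith clean marker && !st.2.isEmpty then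
        (st.1 ++ [PySem.Str.strip (PySem.Str.join " " st.2)], [clean])
      else
        (st.1, st.2 ++ [clean])) ([], [])
  if st.2.isEmpty then st.1 else st.1 ++ [PySem.Str.strip (PySem.Str.join " " st.2)]

-- ===== PORT B =====
def preprocess_listings_alt (lines : List String) (marker : String) : List String :=
  let cleaned := (lines.map PySem.Str.strip).filter (fun s => s ≠ "")
  let starts := (PySem.List.enumerate cleaned).filterMap
      (fun p => if p.1 == 0 || PySem.Str.startswith p.2 marker then some p.1 else none)
  let ends := starts.tail ++ [(cleaned.length : Int)]
  (starts.zip ends).map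
    (fun ab => PySem.Str.strip (PySem.Str.join " " (PySem.List.slice cleaned (some ab.1) (some ab.2))))

-- ===== PRECONDITION & SPEC =====
def Spec_preprocess_listings (lines : List String) (marker : String) (out : List String) : Prop := out = preprocess_listings_alt lines marker
instance (lines : List String) (marker : String) (out : List String) : Decidable (Spec_preprocess_listings lines marker out) := by unfold Spec_preprocess_listings; infer_instance

-- ===== CLAIM (what is proved, stated in full; the proofs are below) =====
def Claim_equal_preprocess_listings : Prop := ∀ (lines : List String) (marker : String), Dom_preprocess_listings lines marker → Spec_preprocess_listings lines marker (preprocess_listings lines marker)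

-- ===== LEMMAS AND PROOFS =====

-- flush of a pending group, exactly as both ports write it
def pvFlush (g : List String) : String := PySem.Str.strip (PySem.Str.join " " g)

-- groups of a cleaned line list: markers (other than at position 0) open new groups
def pvGrpGo (m : String → Bool) (cur : List String) : List String → List (List String)
  | [] => [cur]
  | s :: rest => if m s then cur :: pvGrpGo m [s] rest else pvGrpGo m (cur ++ [s]) rest

-- indices (offset k) of marker lines
def pvMarks (m : String → Bool) : List String → Nat → List Nat
  | [], _ => []
  | s :: xs, k => if m s then k :: pvMarks m xs (k + 1) else pvMarks m xs (k + 1)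

-- cutting c at boundary list bs, current start a
def pvCuts (c : List String) : List Nat → Nat → List (List String)
  | [], a => [c.drop a]
  | b :: bs, a => ((c.drop a).take (b - a)) :: pvCuts c bs b

theorem pvCuts_shift (pre d : List String) (bs : List Nat) (a : Nat) :
    pvCuts (pre ++ d) (bs.map (· + pre.length)) (a + pre.length) = pvCuts d bs a := by
  induction bs generalizing a with
  | nil => simp [pvCuts, List.drop_append]
  | cons b bs ih =>
      simp only [List.map_cons, pvCuts]
      rw [ih]
      congr 1
      have h1 : List.drop (pre.length + a) pre = [] := by
        apply List.drop_eq_nil_of_le; omega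
      rw [show a + pre.length = pre.length + a by omega, List.drop_append, h1,
          List.nil_append, show pre.length + a - pre.length = a by omega,
          show b + pre.length - (pre.length + a) = b - a by omega]

theorem pvMarks_shift (m : String → Bool) (xs : List String) (n k : Nat) :
    pvMarks m xs (n + k) = (pvMarks m xs k).map (· + n) := by
  induction xs generalizing k with
  | nil => simp [pvMarks]
  | cons s xs ih =>
      simp only [pvMarks]
      split
      · rw [show n + k + 1 = n + (k + 1) by omega, ih (k + 1)]
        simp only [List.map_cons]
        congr 1
        omega
      · rw [show n + k + 1 = n + (k + 1) by omega, ih (k + 1)]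

theorem pvGrp_eq_cuts (m : String → Bool) (ys cur : List String) :
    pvCuts (cur ++ ys) (pvMarks m ys cur.length) 0 = pvGrpGo m cur ys := by
  induction ys generalizing cur with
  | nil => simp [pvCuts, pvMarks, pvGrpGo]
  | cons s rest ih =>
      simp only [pvMarks, pvGrpGo]
      by_cases hm : m s = true
      · simp only [hm, if_pos]
        simp only [pvCuts]
        congr 1
        · simp
        · have hsh : pvMarks m rest (cur.length + 1) = (pvMarks m rest 1).map (· + cur.length) :=
            pvMarks_shift m rest cur.length 1
          rw [hsh]
          have := pvCuts_shift cur ([s] ++ rest) (pvMarks m rest 1) 0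
          simp only [Nat.zero_add] at this
          rw [show cur ++ s :: rest = cur ++ ([s] ++ rest) by simp, this]
          exact ih [s]
      · simp only [hm, if_neg, Bool.false_eq_true, not_false_iff]
        have := ih (cur ++ [s])
        simpa using this


-- A's loop step / final flush, named for the proofs (definitionally A's code)
def pvStepA (marker : String) (st : List String × List String) (line : String) : List String × List String :=
  let clean := PySem.Str.strip line
  if clean = "" then st
  else if PySem.Str.startswith clean marker && !st.2.isEmpty then
    (st.1 ++ [PySem.Str.strip (PySem.Str.join " " st.2)], [clean])
  else (st.1, st.2 ++ [clean])

def pvStepC (marker : String) (st : List String × List String) (s : String) : List String × List String :=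
  if PySem.Str.startswith s marker && !st.2.isEmpty then (st.1 ++ [pvFlush st.2], [s]) else (st.1, st.2 ++ [s])

def pvPost (st : List String × List String) : List String :=
  if st.2.isEmpty then st.1 else st.1 ++ [pvFlush st.2]

-- B's slicing pass applied to an already-cleaned list (definitionally B's code after the filter)
def pvAltOn (marker : String) (cleaned : List String) : List String :=
  (((PySem.List.enumerate cleaned).filterMap
      (fun p => if p.1 == 0 || PySem.Str.startswith p.2 marker then some p.1 else none)).zip
    (((PySem.List.enumerate cleaned).filterMap
      (fun p => if p.1 == 0 || PySem.Str.startswith p.2 marker then some p.1 else none)).tail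
      ++ [(cleaned.length : Int)])).map
    (fun ab => PySem.Str.strip (PySem.Str.join " " (PySem.List.slice cleaned (some ab.1) (some ab.2))))

theorem pvFoldA (marker : String) (lines : List String) (st : List String × List String) :
    lines.foldl (pvStepA marker) st
    = ((lines.map PySem.Str.strip).filter (fun s => s ≠ "")).foldl (pvStepC marker) st := by
  induction lines generalizing st with
  | nil => rfl
  | cons l ls ih =>
      rw [List.foldl_cons, List.map_cons, List.filter_cons]
      by_cases h : PySem.Str.strip l = ""
      · rw [show pvStepA marker st l = st by simp only [pvStepA]; rw [if_pos h], ih,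
          if_neg (by simp [h])]
      · rw [show pvStepA marker st l = pvStepC marker st (PySem.Str.strip l) by
            simp only [pvStepA, pvStepC, pvFlush]; rw [if_neg h],
          ih, if_pos (by simp [h]), List.foldl_cons]

theorem pvFoldC (marker : String) (xs : List String) (merged cur : List String) (h : cur ≠ []) :
    pvPost (xs.foldl (pvStepC marker) (merged, cur))
    = merged ++ (pvGrpGo (fun s => PySem.Str.startswith s marker) cur xs).map pvFlush := by
  induction xs generalizing merged cur with
  | nil => simp [pvPost, pvGrpGo, h]
  | cons s xs ih =>
      have hc : cur.isEmpty = false := by simpa using h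
      rw [List.foldl_cons]
      simp only [pvGrpGo]
      by_cases hm : PySem.Str.startswith s marker = true
      · rw [if_pos hm,
          show pvStepC marker (merged, cur) s = (merged ++ [pvFlush cur], [s]) by
            unfold pvStepC; rw [hm, hc]; rfl,
          ih _ [s] (by simp)]
        simp
      · have hmf : PySem.Str.startswith s marker = false := by simpa using hm
        rw [if_neg hm,
          show pvStepC marker (merged, cur) s = (merged, cur ++ [s]) by
            unfold pvStepC; rw [hmf]; rfl,
          ih _ (cur ++ [s]) (by simp)]

theorem pvZip (c : List String) (bs : List Nat) (a : Nat) :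
    ((((a :: bs).map (Nat.cast : Nat → Int)).zip
        ((bs.map (Nat.cast : Nat → Int)) ++ [(c.length : Int)])).map
      (fun ab => PySem.Str.strip (PySem.Str.join " " (PySem.List.slice c (some ab.1) (some ab.2)))))
    = (pvCuts c bs a).map pvFlush := by
  induction bs generalizing a with
  | nil =>
      simp only [List.map_cons, List.map_nil, List.nil_append, List.zip_cons_cons,
        List.zip_nil_left, List.map_cons, List.map_nil, pvCuts, PySem.List.slice_natCast,
        pvFlush]
      rw [List.take_of_length_le (by simp)]
  | cons b bs ih =>
      simp only [List.map_cons, List.cons_append, List.zip_cons_cons, List.map_cons, pvCuts,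
        PySem.List.slice_natCast, pvFlush]
      rw [← ih b]
      simp

theorem pvEnum (marker : String) (xs : List String) (k : Nat) :
    (PySem.List.enumerate xs ((k : Int) + 1)).filterMap
      (fun p => if p.1 == 0 || PySem.Str.startswith p.2 marker then some p.1 else none)
    = (pvMarks (fun s => PySem.Str.startswith s marker) xs (k + 1)).map (Nat.cast : Nat → Int) := by
  induction xs generalizing k with
  | nil => simp [PySem.List.enumerate_nil, pvMarks]
  | cons s xs ih =>
      rw [PySem.List.enumerate_cons]
      have h0 : (((k : Int) + 1) == 0) = false := by
        simp only [beq_eq_false_iff_ne, ne_eq]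
        omega
      have hsucc : (k : Int) + 1 + 1 = ((k + 1 : Nat) : Int) + 1 := by push_cast; ring
      simp only [pvMarks]
      by_cases hm : PySem.Str.startswith s marker = true
      · have hmc : PySem.Chars.startswith s.toList marker.toList = true := by simpa using hm
        rw [List.filterMap_cons_some (b := ((k : Int) + 1)) (by simp [h0, hmc]), hsucc,
          ih (k + 1), if_pos hm,
          List.map_cons]
        congr 1
      · have hmf : PySem.Chars.startswith s.toList marker.toList = false := by
          simpa using hm
        rw [List.filterMap_cons_none (by simp [h0, hmf]), hsucc, ih (k + 1), if_neg hm]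

theorem pvAlt_on_cons (marker x : String) (xs : List String) :
    pvAltOn marker (x :: xs)
    = (pvGrpGo (fun s => PySem.Str.startswith s marker) [x] xs).map pvFlush := by
  unfold pvAltOn
  rw [PySem.List.enumerate_cons,
    List.filterMap_cons_some (b := (0 : Int)) (by simp),
    show (0 : Int) + 1 = (((0 : Nat) : Int) + 1) by norm_num, pvEnum marker xs 0]
  have hzip := pvZip (x :: xs) (pvMarks (fun s => PySem.Str.startswith s marker) xs 1) 0
  simp only [List.map_cons, Nat.cast_zero] at hzip
  rw [show (0 + 1 : Nat) = 1 by rfl, List.tail_cons, hzip]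
  have hg := pvGrp_eq_cuts (fun s => PySem.Str.startswith s marker) xs [x]
  simp only [List.singleton_append, List.length_singleton] at hg
  rw [hg]

theorem pv_main (lines : List String) (marker : String) :
    preprocess_listings lines marker = preprocess_listings_alt lines marker := by
  have hA : preprocess_listings lines marker
      = pvPost (lines.foldl (pvStepA marker) ([], [])) := rfl
  have hB : preprocess_listings_alt lines marker
      = pvAltOn marker ((lines.map PySem.Str.strip).filter (fun s => s ≠ "")) := rfl
  rw [hA, hB, pvFoldA]
  cases hc : (lines.map PySem.Str.strip).filter (fun s => s ≠ "") with
  | nil => simp [pvAltOn, pvPost, PySem.List.enumerate_nil]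
  | cons x xs =>
      rw [List.foldl_cons,
        show pvStepC marker (([], []) : List String × List String) x = ([], [x]) by
          unfold pvStepC; simp,
        pvFoldC marker xs [] [x] (by simp), pvAlt_on_cons]
      simp

-- ===== VERDICT (by name: the statement is the Claim_ definition above) =====
theorem preprocess_listings_spec : Claim_equal_preprocess_listings := by
  intro lines marker _
  unfold Spec_preprocess_listings
  exact pv_main lines marker
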